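-- pv_equiv track=rewrite | github.com/Adam-2000/ShadowNinja | code/resizer_palette.py | palette
-- ===== SOURCE A (Python) =====
-- def palette(rgba):
--     res= ''
--     for i in range(3):
--         cur = ''
--         if rgba[i] < 42:
--             cur = '00'
--         elif rgba[i] < 127:
--             cur = '01'
--         elif rgba[i] < 213:
--             cur = '10'
--         else:
--             cur = '11'
--         res += cur
--     if rgba[3] < 200:
--         res = '0' + res
--     else:
--         res = '1' + res
--     return res
-- ===== SOURCE B (Python) =====
-- def palette(rgba):
--     n = 64 * (rgba[3] >= 200)
--     for v, shift in ((rgba[0], 4), (rgba[1], 2), (rgba[2], 0)):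
--         n += ((v >= 42) + (v >= 127) + (v >= 213)) << shift
--     return format(n, '07b')
-- ===== Notes on version B (the rewrite author's own statement) =====
-- stated objective: alternative
-- what changed: Replaces branch-based string concatenation with branch-free arithmetic: each channel's bucket is a sum of boolean comparisons, the buckets and the alpha bit are packed into one 7-bit integer, and the result is produced in a single binary-format step.
import Mathlib
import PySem

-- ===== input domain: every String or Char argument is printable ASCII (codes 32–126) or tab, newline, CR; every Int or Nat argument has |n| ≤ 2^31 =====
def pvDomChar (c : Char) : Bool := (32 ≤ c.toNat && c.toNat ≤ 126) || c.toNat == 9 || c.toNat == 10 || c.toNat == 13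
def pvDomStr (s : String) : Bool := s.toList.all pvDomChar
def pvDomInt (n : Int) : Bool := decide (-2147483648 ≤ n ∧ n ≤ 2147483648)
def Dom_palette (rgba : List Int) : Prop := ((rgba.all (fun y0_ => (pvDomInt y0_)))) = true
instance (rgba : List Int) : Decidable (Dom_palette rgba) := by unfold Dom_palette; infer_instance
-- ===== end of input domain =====

-- B packs the alpha bit and three branch-free comparison-sum buckets into one
-- 7-bit integer and formats it in binary; same values, no speed claim.

-- ===== PORT A =====
-- one iteration of A's loop body: pick the 2-bit code for channel i and append it
def paletteStep (rgba : List Int) (res : String) (i : Int) : String :=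
  let v := PySem.List.pyGetD rgba i 0   -- in-range under Pre_ (A raises IndexError otherwise)
  let cur := if v < 42 then "00" else if v < 127 then "01" else if v < 213 then "10" else "11"
  res ++ cur

def palette (rgba : List Int) : String :=
  let res := (PySem.List.pyRange 0 3 1).foldl (paletteStep rgba) ""
  if PySem.List.pyGetD rgba 3 0 < 200 then "0" ++ res else "1" ++ res

-- ===== PORT B =====
-- ((v >= 42) + (v >= 127) + (v >= 213)) : Python booleans summed as 0/1 integers
def bucket (v : Int) : Int :=
  (if v ≥ 42 then 1 else 0) + (if v ≥ 127 then 1 else 0) + (if v ≥ 213 then 1 else 0)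

-- format(n, '07b') for 0 ≤ n < 128: seven binary digits, most significant first
def fmt07b (n : Nat) : String :=
  String.ofList ((List.range 7).map (fun i => if n.testBit (6 - i) then '1' else '0'))

def palette_alt (rgba : List Int) : String :=
  let n0 : Int := 64 * (if PySem.List.pyGetD rgba 3 0 ≥ 200 then 1 else 0)
  let n := [(PySem.List.pyGetD rgba 0 0, 4), (PySem.List.pyGetD rgba 1 0, 2),
            (PySem.List.pyGetD rgba 2 0, 0)].foldl
      (fun acc p => acc + bucket p.1 * 2 ^ p.2) n0
  fmt07b n.toNat

-- ===== PRECONDITION & SPEC =====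
-- A indexes rgba[0..3]; it raises IndexError on lists shorter than 4, so those are excluded.
def Pre_palette (rgba : List Int) : Prop := 4 ≤ rgba.length
instance (rgba : List Int) : Decidable (Pre_palette rgba) := by unfold Pre_palette; infer_instance
def pvWitness_palette : List Int := [0, 100, 250, 255]

def Spec_palette (rgba : List Int) (out : String) : Prop := out = palette_alt rgba
instance (rgba : List Int) (out : String) : Decidable (Spec_palette rgba out) := by unfold Spec_palette; infer_instance

-- ===== CLAIM (what is proved, stated in full; the proofs are below) =====
def Claim_equal_palette : Prop := ∀ (rgba : List Int), Dom_palette rgba → Pre_palette rgba → Spec_palette rgba (palette rgba)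

-- ===== LEMMAS AND PROOFS =====
-- A's 2-bit code for a bucket number
def chanStr (k : Nat) : String :=
  if k = 0 then "00" else if k = 1 then "01" else if k = 2 then "10" else "11"

-- each channel value yields some bucket k ≤ 3 whose 2-bit code is A's cur string
theorem bucket_char (x : Int) :
    ∃ k : Nat, k ≤ 3 ∧ bucket x = (k : Int) ∧
      (if x < 42 then "00" else if x < 127 then "01" else if x < 213 then "10" else "11")
        = chanStr k := by
  by_cases h1 : (42:Int) ≤ x <;> by_cases h2 : (127:Int) ≤ x <;> by_cases h3 : (213:Int) ≤ x <;>
    [ exact ⟨3, by norm_num, by simp [bucket, h1, h2, h3], by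
        simp [chanStr, show ¬ x < 42 by omega, show ¬ x < 127 by omega, show ¬ x < 213 by omega]⟩;
      exact ⟨2, by norm_num, by simp [bucket, h1, h2, h3], by
        simp [chanStr, show ¬ x < 42 by omega, show ¬ x < 127 by omega, show x < 213 by omega]⟩;
      exact absurd h3 (by omega);
      exact ⟨1, by norm_num, by simp [bucket, h1, h2, h3], by
        simp [chanStr, show ¬ x < 42 by omega, show x < 127 by omega]⟩;
      exact absurd h2 (by omega);
      exact absurd h2 (by omega);
      exact absurd h3 (by omega);
      exact ⟨0, by norm_num, by simp [bucket, h1, h2, h3], by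
        simp [chanStr, show x < 42 by omega]⟩ ]

-- the binary formatting of the packed integer is the concatenation of the four codes
theorem pack_eq (a k1 k2 k3 : Nat) (ha : a ≤ 1) (h1 : k1 ≤ 3) (h2 : k2 ≤ 3) (h3 : k3 ≤ 3) :
    fmt07b (64 * a + 16 * k1 + 4 * k2 + k3)
      = (if a = 0 then "0" else "1") ++ chanStr k1 ++ chanStr k2 ++ chanStr k3 := by
  interval_cases a <;> interval_cases k1 <;> interval_cases k2 <;> interval_cases k3 <;> decide

-- ===== VERDICT (by name: the statement is the Claim_ definition above) =====
theorem palette_spec : Claim_equal_palette := by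
  intro rgba _ hpre
  unfold Spec_palette palette palette_alt
  match rgba, hpre with
  | a :: b :: c :: d :: rest, _ =>
    have hr : PySem.List.pyRange 0 3 1 = [(0:Int), 1, 2] := by decide
    have h0 : PySem.List.pyGetD (a :: b :: c :: d :: rest) 0 0 = a := by
      simp [PySem.List.pyGetD, PySem.List.pyGet?, PySem.List.pyIdx?, show (0:Int) ≤ ↑rest.length + 1 + 1 + 1 by positivity]
    have h1 : PySem.List.pyGetD (a :: b :: c :: d :: rest) 1 0 = b := by
      simpa using PySem.List.pyGetD_natCast (n := 1) (xs := a :: b :: c :: d :: rest) (d := 0)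
    have h2 : PySem.List.pyGetD (a :: b :: c :: d :: rest) 2 0 = c := by
      simpa using PySem.List.pyGetD_natCast (n := 2) (xs := a :: b :: c :: d :: rest) (d := 0)
    have h3 : PySem.List.pyGetD (a :: b :: c :: d :: rest) 3 0 = d := by
      simpa using PySem.List.pyGetD_natCast (n := 3) (xs := a :: b :: c :: d :: rest) (d := 0)
    obtain ⟨ka, hka, hba, hsa⟩ := bucket_char a
    obtain ⟨kb, hkb, hbb, hsb⟩ := bucket_char b
    obtain ⟨kc, hkc, hbc, hsc⟩ := bucket_char c
    simp only [hr, List.foldl, paletteStep, h0, h1, h2, h3, hba, hbb, hbc, hsa, hsb, hsc]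
    by_cases hd : d < 200
    · have hn : ((64 * (if d ≥ 200 then (1:Int) else 0) + (ka:Int) * 2 ^ 4 + (kb:Int) * 2 ^ 2
          + (kc:Int) * 2 ^ 0)).toNat = 64 * 0 + 16 * ka + 4 * kb + kc := by
        simp [show ¬ d ≥ 200 by omega]; omega
      simp only [hn, pack_eq 0 ka kb kc (by norm_num) hka hkb hkc,
        if_pos hd]
      simp [String.append_assoc]
    · have hn : ((64 * (if d ≥ 200 then (1:Int) else 0) + (ka:Int) * 2 ^ 4 + (kb:Int) * 2 ^ 2
          + (kc:Int) * 2 ^ 0)).toNat = 64 * 1 + 16 * ka + 4 * kb + kc := by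
        simp [show d ≥ 200 by omega]; omega
      simp only [hn, pack_eq 1 ka kb kc (by norm_num) hka hkb hkc,
        if_neg hd]
      simp [String.append_assoc]
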